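-- pv_equiv track=rewrite | github.com/Sahana-Sivaraj/CausalityEstimationforTextUsingDoubleMachinelearningModel | testdata/extracode/Word2VecModel.py | prepare_dictionary
-- ===== SOURCE A (Python) =====
-- def prepare_dictionary(data):
--     idx = 0
--     word2idx = {}
--     idx2word = {}
--     for sentence in data:
--         for line in sentence:
--             for word in line:
--                 if word not in word2idx.keys():
--                     word2idx[word] = idx
--                     idx2word[idx] = word
--                     idx += 1
--     vocab_size = len(word2idx.keys())
--     return vocab_size, word2idx, idx2word
-- ===== SOURCE B (Python) =====
-- def prepare_dictionary(data):
--     words = [w for sentence in data for line in sentence for w in line]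
--     first = {}
--     for pos, w in reversed(list(enumerate(words))):
--         first[w] = pos
--     uniq = sorted(first, key=first.get)
--     word2idx = {w: i for i, w in enumerate(uniq)}
--     idx2word = dict(enumerate(uniq))
--     return len(uniq), word2idx, idx2word
-- ===== Notes on version B (the rewrite author's own statement) =====
-- stated objective: alternative
-- what changed: Instead of A's guarded triple-nested loop with a manual counter, B records each word's position in a single reversed sweep (last write wins = first occurrence) and then sorts the recorded vocabulary by first-occurrence position before enumerating both maps.
import Mathlib
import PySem

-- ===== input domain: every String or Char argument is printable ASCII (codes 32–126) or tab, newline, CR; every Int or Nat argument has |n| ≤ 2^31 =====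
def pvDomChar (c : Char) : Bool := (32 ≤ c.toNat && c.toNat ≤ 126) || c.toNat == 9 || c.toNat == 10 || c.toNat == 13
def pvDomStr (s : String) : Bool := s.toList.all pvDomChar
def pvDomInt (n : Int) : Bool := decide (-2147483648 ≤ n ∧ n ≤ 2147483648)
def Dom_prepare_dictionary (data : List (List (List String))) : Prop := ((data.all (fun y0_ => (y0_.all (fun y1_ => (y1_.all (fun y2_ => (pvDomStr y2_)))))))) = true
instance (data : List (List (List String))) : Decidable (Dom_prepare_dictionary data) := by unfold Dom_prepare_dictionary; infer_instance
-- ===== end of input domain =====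

-- B replaces A's guarded triple-nested insertion loop by a reverse position-recording sweep
-- (last write wins = first occurrence) followed by a sort of the vocabulary by first position;
-- same return value, objective: alternative (sort-based instead of guarded streaming build).

-- ===== PORT A =====
-- one step of A's inner loop body: the membership guard and the two inserts with the manual counter
def pvStepA (st : Int × PySem.Dict String Int × PySem.Dict Int String) (word : String) :
    Int × PySem.Dict String Int × PySem.Dict Int String :=
  if (st.2.1).contains word then st
  else (st.1 + 1, (st.2.1).insert word st.1, (st.2.2).insert st.1 word)

def prepare_dictionary (data : List (List (List String))) : Int × (List (String × Int)) × (List (Int × String)) :=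
  let st := data.foldl (fun st sentence =>
    sentence.foldl (fun st line =>
      line.foldl pvStepA st) st)
    ((0 : Int), (PySem.Dict.empty : PySem.Dict String Int), (PySem.Dict.empty : PySem.Dict Int String))
  (((st.2.1).keys.length : Int), (st.2.1).items, (st.2.2).items)

-- ===== PORT B =====
def prepare_dictionary_alt (data : List (List (List String))) : Int × (List (String × Int)) × (List (Int × String)) :=
  let words := data.flatMap (fun sentence => sentence.flatMap (fun line => line))
  let first := (PySem.List.enumerate words 0).reverse.foldl
    (fun d p => d.insert p.2 p.1) (PySem.Dict.empty : PySem.Dict String Int)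
  let uniq := PySem.List.sorted first.keys (fun w => first.getD w 0) false
  (((uniq.length : Int)),
   (PySem.List.enumerate uniq 0).map (fun p => (p.2, p.1)),
   PySem.List.enumerate uniq 0)

-- ===== PRECONDITION & SPEC =====
def Spec_prepare_dictionary (data : List (List (List String))) (out : Int × (List (String × Int)) × (List (Int × String))) : Prop := out = prepare_dictionary_alt data
instance (data : List (List (List String))) (out : Int × (List (String × Int)) × (List (Int × String))) : Decidable (Spec_prepare_dictionary data out) := by unfold Spec_prepare_dictionary; infer_instance

-- ===== CLAIM (what is proved, stated in full; the proofs are below) =====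
def Claim_equal_prepare_dictionary : Prop := ∀ (data : List (List (List String))), Dom_prepare_dictionary data → Spec_prepare_dictionary data (prepare_dictionary data)

-- ===== LEMMAS AND PROOFS =====

-- A's loop state after having seen exactly the distinct words u (in order)
def pvMkA (u : List String) : Int × PySem.Dict String Int × PySem.Dict Int String :=
  ((u.length : Int),
   PySem.Dict.mk ((PySem.List.enumerate u 0).map (fun p => (p.2, p.1))),
   PySem.Dict.mk (PySem.List.enumerate u 0))

lemma pvKeysA (u : List String) : (pvMkA u).2.1.keys = u := by
  simp only [pvMkA, PySem.Dict.keys_mk, List.map_map]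
  exact PySem.List.map_snd_enumerate u 0

lemma pvStepA_inv (u : List String) (w : String) :
    pvStepA (pvMkA u) w = pvMkA (PySem.Set.add u w) := by
  by_cases hw : w ∈ u
  · have hc : (pvMkA u).2.1.contains w = true := by
      rw [PySem.Dict.contains_eq_decide_mem_keys, pvKeysA]; simp [hw]
    simp [pvStepA, hc, PySem.Set.add_of_mem hw]
  · have hc : (pvMkA u).2.1.contains w = false := by
      rw [PySem.Dict.contains_eq_decide_mem_keys, pvKeysA]; simp [hw]
    have hc2 : (pvMkA u).2.2.contains (pvMkA u).1 = false := by
      show (pvMkA u).2.2.contains ((u.length : Int)) = false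
      rw [PySem.Dict.contains_eq_decide_mem_keys]
      simp only [pvMkA, PySem.Dict.keys_mk, PySem.List.map_fst_enumerate]
      simp [PySem.List.mem_pyRange_one]
    rw [PySem.Set.add_of_not_mem hw]
    simp only [pvStepA, hc, Bool.false_eq_true, if_false]
    refine Prod.ext ?_ (Prod.ext ?_ ?_)
    · simp [pvMkA]
    · apply PySem.Dict.ext
      rw [PySem.Dict.items_insert, hc]
      simp [pvMkA, PySem.List.enumerate_append]
    · apply PySem.Dict.ext
      rw [PySem.Dict.items_insert, hc2]
      simp [pvMkA, PySem.List.enumerate_append]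

lemma pvFoldA_inv (ws : List String) : ∀ (u : List String),
    ws.foldl pvStepA (pvMkA u) = pvMkA (ws.foldl PySem.Set.add u) := by
  induction ws with
  | nil => intro u; rfl
  | cons w ws ih =>
    intro u
    simp only [List.foldl_cons, pvStepA_inv u w]
    exact ih _

-- B-side: the reverse-sweep dict looked up at w is the FIRST pair of the original stream with second component w
lemma pvGetDFold (l : List (Int × String)) : ∀ (d : PySem.Dict String Int) (w : String),
    (l.foldl (fun d p => d.insert p.2 p.1) d).getD w 0 =
      match l.reverse.find? (fun p => p.2 == w) with
      | some p => p.1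
      | none => d.getD w 0 := by
  induction l with
  | nil => intro d w; rfl
  | cons x l ih =>
    intro d w
    simp only [List.foldl_cons, ih, List.reverse_cons, List.find?_append]
    cases h : l.reverse.find? (fun p => p.2 == w) with
    | some p => simp
    | none =>
      by_cases hw : x.2 = w
      · subst hw; simp [List.find?, PySem.Dict.getD_insert_self]
      · have hbw : (x.2 == w) = false := by simp [hw]
        rw [PySem.Dict.getD_insert_of_ne d x.1 0 (Ne.symm hw)]
        simp [List.find?, hbw]

-- find? over an enumerated stream = index? of the underlying list
lemma pvFindEnum (ws : List String) : ∀ (s : Int) (w : String),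
    (PySem.List.enumerate ws s).find? (fun p => p.2 == w) =
      (PySem.List.index? ws w).map (fun k => ((s + (k : Int)), w)) := by
  induction ws with
  | nil => intro s w; rfl
  | cons x ws ih =>
    intro s w
    rw [PySem.List.enumerate_cons]
    by_cases hw : x = w
    · subst hw
      rw [PySem.List.index?_cons_self, List.find?_cons_of_pos (by simp)]
      simp
    · rw [PySem.List.index?_cons_of_ne _ hw, List.find?_cons_of_neg (by simp [hw]),
        ih (s+1) w]
      cases PySem.List.index? ws w with
      | none => rfl
      | some k => simp; omega

-- the first-occurrence key of B as a function of the word list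
def pvKey (ws : List String) (w : String) : Int :=
  ((PySem.List.index? ws w).map (fun k => (k : Int))).getD 0

lemma pvGetD_eq_key (ws : List String) (w : String) :
    ((PySem.List.enumerate ws 0).reverse.foldl (fun d p => d.insert p.2 p.1)
        (PySem.Dict.empty : PySem.Dict String Int)).getD w 0 = pvKey ws w := by
  rw [pvGetDFold, List.reverse_reverse, pvFindEnum ws 0 w]
  unfold pvKey
  cases h : PySem.List.index? ws w with
  | none => rfl
  | some k => simp

-- the deduplicated word list is strictly increasing under the first-occurrence key
lemma pvPairwiseKey (ws : List String) :
    (PySem.Set.ofList ws).Pairwise (fun a b => pvKey ws a < pvKey ws b) := by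
  induction ws using List.reverseRecOn with
  | nil => simp [PySem.Set.ofList]
  | append_singleton xs x ih =>
    have hofl : PySem.Set.ofList (xs ++ [x]) = PySem.Set.add (PySem.Set.ofList xs) x := by
      rw [PySem.Set.ofList_eq_foldl, PySem.Set.ofList_eq_foldl, List.foldl_append]
      rfl
    have hkey : ∀ a ∈ xs, pvKey (xs ++ [x]) a = pvKey xs a := by
      intro a ha
      simp only [pvKey, PySem.List.index?_append_of_mem _ ha]
    by_cases hx : x ∈ xs
    · rw [hofl, PySem.Set.add_of_mem ((PySem.Set.mem_ofList _ _).mpr hx)]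
      refine ih.imp_of_mem ?_
      intro a b ha hb h
      rwa [hkey a ((PySem.Set.mem_ofList _ _).mp ha), hkey b ((PySem.Set.mem_ofList _ _).mp hb)]
    · rw [hofl, PySem.Set.add_of_not_mem (fun hm => hx ((PySem.Set.mem_ofList _ _).mp hm))]
      rw [List.pairwise_append]
      refine ⟨ih.imp_of_mem ?_, List.pairwise_singleton _ _, ?_⟩
      · intro a b ha hb h
        rwa [hkey a ((PySem.Set.mem_ofList _ _).mp ha), hkey b ((PySem.Set.mem_ofList _ _).mp hb)]
      · intro a ha b hb
        rw [List.mem_singleton] at hb; rw [hb]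
        have haxs : a ∈ xs := (PySem.Set.mem_ofList _ _).mp ha
        obtain ⟨j, hj⟩ := Option.isSome_iff_exists.mp
          ((PySem.List.index?_isSome_iff xs a).mpr haxs)
        obtain ⟨hjlt, -, -⟩ := PySem.List.getElem_of_index?_eq_some hj
        have h1 : pvKey (xs ++ [x]) a = (j : Int) := by
          unfold pvKey; rw [PySem.List.index?_append_of_mem _ haxs, hj]; rfl
        have h2 : pvKey (xs ++ [x]) x = (xs.length : Int) := by
          unfold pvKey; rw [PySem.List.index?_append_singleton_self xs x hx]; rfl
        rw [h1, h2]; exact_mod_cast hjlt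

-- B's sorted vocabulary IS the ordered dedup of the word stream
lemma pvSortedEq (ws : List String) :
    PySem.List.sorted
      ((PySem.List.enumerate ws 0).reverse.foldl (fun d p => d.insert p.2 p.1)
        (PySem.Dict.empty : PySem.Dict String Int)).keys
      (fun w => ((PySem.List.enumerate ws 0).reverse.foldl (fun d p => d.insert p.2 p.1)
        (PySem.Dict.empty : PySem.Dict String Int)).getD w 0) false
      = PySem.Set.ofList ws := by
  have hkeys : ((PySem.List.enumerate ws 0).reverse.foldl (fun d p => d.insert p.2 p.1)
      (PySem.Dict.empty : PySem.Dict String Int)).keys = PySem.Set.ofList ws.reverse := by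
    rw [PySem.Dict.keys_foldl_insert_key, PySem.Dict.keys_empty]
    have hupd : PySem.Set.update ([] : PySem.Set String)
        (List.map (fun p => p.2) (PySem.List.enumerate ws 0).reverse) =
        PySem.Set.ofList ((PySem.List.enumerate ws 0).reverse.map (fun p => p.2)) := by
      rw [PySem.Set.ofList_eq_foldl]; rfl
    rw [hupd, List.map_reverse, PySem.List.map_snd_enumerate]
  have hperm : (PySem.Set.ofList ws).Perm
      (((PySem.List.enumerate ws 0).reverse.foldl (fun d p => d.insert p.2 p.1)
        (PySem.Dict.empty : PySem.Dict String Int)).keys) := by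
    rw [hkeys]
    refine (List.perm_ext_iff_of_nodup (PySem.Set.nodup_ofList _) (PySem.Set.nodup_ofList _)).mpr ?_
    intro a
    rw [PySem.Set.mem_ofList, PySem.Set.mem_ofList, List.mem_reverse]
  refine PySem.List.sorted_eq_of_perm_of_pairwise_lt _ _ _ hperm ?_
  refine (pvPairwiseKey ws).imp_of_mem ?_
  intro a b _ _ h
  rwa [pvGetD_eq_key, pvGetD_eq_key]

-- ===== VERDICT (by name: the statement is the Claim_ definition above) =====
theorem prepare_dictionary_spec : Claim_equal_prepare_dictionary := by
  intro data _
  show prepare_dictionary data = prepare_dictionary_alt data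
  have hflat : (data.flatMap (fun sentence => sentence.flatMap (fun line => line))).foldl pvStepA (pvMkA []) =
      data.foldl (fun st sentence =>
        sentence.foldl (fun st line => line.foldl pvStepA st) st) (pvMkA []) := by
    simp only [List.foldl_flatMap]
  have h0 : ((0 : Int), (PySem.Dict.empty : PySem.Dict String Int), (PySem.Dict.empty : PySem.Dict Int String)) = pvMkA [] := rfl
  simp only [prepare_dictionary, prepare_dictionary_alt, h0, ← hflat,
    pvFoldA_inv _ []]
  rw [pvSortedEq]
  rw [PySem.Set.ofList_eq_foldl]
  simp [pvMkA, PySem.Dict.keys, PySem.List.length_enumerate]
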